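-- pv_equiv track=rewrite | github.com/Timbertighe/NetAPI-PANOS | xml_api.py | xpath_to_xml
-- ===== SOURCE A (Python) =====
-- def xpath_to_xml(xpath, argument):
--     """
--     Convert an xpath to an XML structure
--
--     Parameters
--     ----------
--     xpath : str
--         The xpath to convert
--
--     Raises
--     ------
--     None
--
--     Returns
--     -------
--     xml : str
--         The XML structure
--     """
--
--     # Split the xpath into a list
--     x_list = xpath.split('/')
--     x_list.pop(0)
--
--     # Create the XML structure
--     xml = ''
--     for entry in x_list:
--         xml += f'<{entry}>'
--
--     # Add the argument
--     xml += argument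
--
--     for entry in reversed(x_list):
--         xml += f'</{entry}>'
--
--     # Return the XML structure
--     return xml
-- ===== SOURCE B (Python) =====
-- def xpath_to_xml(xpath, argument):
--     """
--     Convert an xpath to an XML structure (recursive decomposition: one pass
--     that mirrors the nesting instead of two loops over the segment list).
--     """
--     def build(segs):
--         if not segs:
--             return argument
--         head = segs[0]
--         return f'<{head}>' + build(segs[1:]) + f'</{head}>'
--
--     return build(xpath.split('/')[1:])
-- ===== Notes on version B (the rewrite author's own statement) =====
-- stated objective: alternative
-- what changed: Replaces A's two sequential loops (forward for opening tags, reversed for closing tags) with a single recursive helper that builds the nested XML in one pass over the segment list.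
import Mathlib
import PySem

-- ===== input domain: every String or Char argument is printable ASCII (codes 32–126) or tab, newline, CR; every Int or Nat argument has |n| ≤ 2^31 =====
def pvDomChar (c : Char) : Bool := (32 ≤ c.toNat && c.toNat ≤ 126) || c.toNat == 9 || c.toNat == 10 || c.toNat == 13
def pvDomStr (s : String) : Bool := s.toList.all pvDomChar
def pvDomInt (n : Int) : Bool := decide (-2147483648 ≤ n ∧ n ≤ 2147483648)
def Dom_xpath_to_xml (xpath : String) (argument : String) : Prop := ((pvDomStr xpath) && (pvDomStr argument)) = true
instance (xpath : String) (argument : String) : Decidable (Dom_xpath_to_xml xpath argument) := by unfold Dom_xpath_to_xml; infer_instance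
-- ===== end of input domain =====

-- B replaces A's two sequential tag loops with one recursive pass mirroring the XML nesting; same O(n) cost, return values proved equal on all inputs.

-- ===== PORT A =====
def xpath_to_xml (xpath : String) (argument : String) : String :=
  match PySem.Str.split? xpath "/" with  -- separator "/" is nonempty, so split? is always some
  | none => ""
  | some x_list =>
  match PySem.List.pop? x_list 0 with
  | none => ""  -- unreachable: str.split always yields at least one piece
  | some (_, x_list) =>
    let xml : String := x_list.foldl (fun xml entry => xml ++ "<" ++ entry ++ ">") ""
    let xml := xml ++ argument
    x_list.reverse.foldl (fun xml entry => xml ++ "</" ++ entry ++ ">") xml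

-- ===== PORT B =====
def pvBuild (argument : String) : List String → String
  | [] => argument
  | head :: tail => "<" ++ head ++ ">" ++ pvBuild argument tail ++ "</" ++ head ++ ">"

def xpath_to_xml_alt (xpath : String) (argument : String) : String :=
  match PySem.Str.split? xpath "/" with  -- separator "/" is nonempty, so split? is always some
  | none => ""
  | some segs => pvBuild argument (segs.drop 1)

-- ===== PRECONDITION & SPEC =====
def Spec_xpath_to_xml (xpath : String) (argument : String) (out : String) : Prop := out = xpath_to_xml_alt xpath argument
instance (xpath : String) (argument : String) (out : String) : Decidable (Spec_xpath_to_xml xpath argument out) := by unfold Spec_xpath_to_xml; infer_instance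

-- ===== CLAIM (what is proved, stated in full; the proofs are below) =====
def Claim_equal_xpath_to_xml : Prop := ∀ (xpath : String) (argument : String), Dom_xpath_to_xml xpath argument → Spec_xpath_to_xml xpath argument (xpath_to_xml xpath argument)

-- ===== LEMMAS AND PROOFS =====

theorem pv_go_ne_nil (sep : List Char) :
    ∀ fuel l cur acc, PySem.Chars.splitOn.go sep fuel l cur acc ≠ [] := by
  intro fuel
  induction fuel with
  | zero => intro l cur acc; simp [PySem.Chars.splitOn.go]
  | succ n ih =>
    intro l cur acc
    cases l with
    | nil => simp [PySem.Chars.splitOn.go]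
    | cons c rest =>
      simp only [PySem.Chars.splitOn.go]
      split
      · exact ih _ _ _
      · exact ih _ _ _

theorem pv_splitOn_ne_nil (s sep : List Char) : PySem.Chars.splitOn s sep ≠ [] := by
  unfold PySem.Chars.splitOn
  exact pv_go_ne_nil sep _ s [] []

theorem pvBuild_eq (arg : String) (l : List String) (pre : String) :
    l.reverse.foldl (fun xml e => xml ++ "</" ++ e ++ ">")
      ((l.foldl (fun xml e => xml ++ "<" ++ e ++ ">") pre) ++ arg)
    = pre ++ pvBuild arg l := by
  induction l generalizing pre with
  | nil => simp [pvBuild]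
  | cons h t ih =>
    simp only [List.reverse_cons, List.foldl_append, List.foldl_cons, List.foldl_nil, pvBuild]
    rw [ih]
    simp [String.append_assoc]

-- ===== VERDICT (by name: the statement is the Claim_ definition above) =====
theorem xpath_to_xml_spec : Claim_equal_xpath_to_xml := by
  intro xpath argument _
  unfold Spec_xpath_to_xml xpath_to_xml xpath_to_xml_alt
  cases hsp : PySem.Str.split? xpath "/" with
  | none => rfl
  | some l =>
    have hm := PySem.Str.split?_map xpath "/"
    rw [hsp] at hm
    have hne : l ≠ [] := by
      intro h
      subst h
      simp [PySem.Chars.split?] at hm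
      exact pv_splitOn_ne_nil _ _ hm
    obtain ⟨h, t, e⟩ := List.exists_cons_of_ne_nil hne
    subst e
    simp only [PySem.List.pop?_zero_cons, List.drop_one, List.tail_cons]
    rw [pvBuild_eq]
    simp
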